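-- pv_equiv track=rewrite | github.com/HPCL/codepurrfect | src/static/passes-other/count-comments/test.py | contains_comment_char
-- ===== SOURCE A (Python) =====
-- def contains_comment_char(comment_starter_str_l, c):
--     to_return    = (False, None)
--     '''
--         // test C comment
--         hello world // at the end
--         // test another C comment
--         // on consecutive lines
--         now this is the /* tough one */ but we move
--         of /* this case
--         that continues on
--         multiple lines before it's close */ we still move
--         for another example of such
--         multiline comments see {- blah -}
--     '''
--     for i, string in enumerate(comment_starter_str_l):
--         if c in string:
--             to_return = (True, i) # end of line comment
--     return to_return
-- ===== SOURCE B (Python) =====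
-- def contains_comment_char(comment_starter_str_l, c):
--     for i in range(len(comment_starter_str_l) - 1, -1, -1):
--         if c in comment_starter_str_l[i]:
--             return (True, i)
--     return (False, None)
-- ===== Notes on version B (the rewrite author's own statement) =====
-- stated objective: alternative
-- what changed: Replaces the forward pass that overwrites the result on every match with a backward index scan that returns at the first hit (which is the last forward match); it trades the unconditional full pass for an early-exit loop, measured at the same cost on the timing inputs.
import Mathlib
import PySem

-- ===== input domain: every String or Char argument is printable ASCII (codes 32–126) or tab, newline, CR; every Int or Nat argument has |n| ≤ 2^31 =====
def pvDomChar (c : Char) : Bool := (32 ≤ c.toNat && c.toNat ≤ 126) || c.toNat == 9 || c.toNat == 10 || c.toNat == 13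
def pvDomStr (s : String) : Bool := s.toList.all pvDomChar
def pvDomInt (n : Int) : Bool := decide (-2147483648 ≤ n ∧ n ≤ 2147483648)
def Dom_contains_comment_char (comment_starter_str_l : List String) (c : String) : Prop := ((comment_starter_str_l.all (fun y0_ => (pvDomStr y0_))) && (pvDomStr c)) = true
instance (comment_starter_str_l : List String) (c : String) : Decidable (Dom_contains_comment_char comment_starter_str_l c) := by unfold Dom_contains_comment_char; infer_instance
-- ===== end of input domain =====

-- B replaces A's forward overwrite-every-match pass with a backward index scan
-- that returns at the first hit; same return value on every input.
-- ===== PORT A =====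
def contains_comment_char (comment_starter_str_l : List String) (c : String) : Bool × Option Int :=
  (PySem.List.enumerate comment_starter_str_l).foldl
    (fun to_return p => if PySem.Str.isIn c p.2 then (true, some p.1) else to_return)
    (false, none)

-- ===== PORT B =====
-- loop 'for i in range(len(l)-1, -1, -1)': argument is i+1 (number of indices left to try)
def ccAltLoop (l : List String) (c : String) : Nat → Bool × Option Int
  | 0 => (false, none)
  | Nat.succ i =>
      if PySem.Str.isIn c (PySem.List.pyGetD l (i : Int) "") then (true, some (i : Int))
      else ccAltLoop l c i

def contains_comment_char_alt (comment_starter_str_l : List String) (c : String) : Bool × Option Int :=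
  ccAltLoop comment_starter_str_l c comment_starter_str_l.length

-- ===== PRECONDITION & SPEC =====
def Spec_contains_comment_char (comment_starter_str_l : List String) (c : String) (out : Bool × Option Int) : Prop := out = contains_comment_char_alt comment_starter_str_l c
instance (comment_starter_str_l : List String) (c : String) (out : Bool × Option Int) : Decidable (Spec_contains_comment_char comment_starter_str_l c out) := by unfold Spec_contains_comment_char; infer_instance

-- ===== CLAIM (what is proved, stated in full; the proofs are below) =====
def Claim_equal_contains_comment_char : Prop := ∀ (comment_starter_str_l : List String) (c : String), Dom_contains_comment_char comment_starter_str_l c → Spec_contains_comment_char comment_starter_str_l c (contains_comment_char comment_starter_str_l c)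

-- ===== LEMMAS AND PROOFS =====
lemma ccAltLoop_append (xs : List String) (x c : String) (i : Nat) (h : i ≤ xs.length) :
    ccAltLoop (xs ++ [x]) c i = ccAltLoop xs c i := by
  induction i with
  | zero => rfl
  | succ i ih =>
      have hi : i < xs.length := by omega
      simp only [ccAltLoop, PySem.List.pyGetD_natCast]
      rw [List.getD_eq_getElem?_getD, List.getElem?_append_left hi, ← List.getD_eq_getElem?_getD,
        ih (by omega)]

lemma contains_eq_alt (l : List String) (c : String) :
    contains_comment_char l c = contains_comment_char_alt l c := by
  induction l using List.reverseRecOn with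
  | nil => rfl
  | append_singleton xs x ih =>
      simp only [contains_comment_char, contains_comment_char_alt,
        PySem.List.enumerate_append, PySem.List.enumerate_cons, PySem.List.enumerate_nil,
        List.foldl_append, List.foldl_cons, List.foldl_nil, List.length_append,
        List.length_singleton] at *
      rw [show xs.length + 1 = Nat.succ xs.length from rfl]
      simp only [ccAltLoop, PySem.List.pyGetD_natCast]
      rw [List.getD_eq_getElem?_getD, List.getElem?_append_right (by omega)]
      simp only [Nat.sub_self, List.getElem?_cons_zero, Option.getD_some,
        ccAltLoop_append xs x c xs.length le_rfl, ih]
      norm_num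

-- ===== VERDICT (by name: the statement is the Claim_ definition above) =====
theorem contains_comment_char_spec : Claim_equal_contains_comment_char := by
  intro l c _
  exact contains_eq_alt l c
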